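-- pv_equiv track=rewrite | github.com/lucas-harris/rec-data-management | pages/queries.py | eliminate_duplicates_hour
-- ===== SOURCE A (Python) =====
-- from collections import OrderedDict
--
-- def eliminate_duplicates_hour(dictionary):
--     year_dictionary = dict()
--     return_dictionary = OrderedDict()
--     for key in dictionary:
--         year_dictionary[key.split(',')[1]] = True
--     if len(year_dictionary) == 1:
--         for key in dictionary:
--             return_dictionary[key.split(',')[0]] = dictionary[key]
--         return return_dictionary
--     else:
--         return dictionary
-- ===== SOURCE B (Python) =====
-- from collections import OrderedDict
--
-- def eliminate_duplicates_hour(dictionary):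
--     it = iter(dictionary.items())
--     try:
--         first_key, first_val = next(it)
--     except StopIteration:
--         return dictionary
--     year = first_key.split(',')[1]
--     result = OrderedDict({first_key.split(',')[0]: first_val})
--     for key, value in it:
--         parts = key.split(',')
--         if parts[1] != year:
--             return dictionary
--         result[parts[0]] = value
--     return result
-- ===== Notes on version B (the rewrite author's own statement) =====
-- stated objective: alternative
-- what changed: Replaces A's count-the-distinct-years strategy (build a dict of all years, test its size, then a second whole pass rebuilding the result with a by-key lookup) by a single early-exit pass that compares each year to the first key's year and bails out to the original dict at the first mismatch, building the result incrementally as it goes; no year set/dict is built at all. Pre_ excludes keys without a comma (A raises IndexError there) and association lists with duplicate keys, which do not represent a Python dict.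
-- outside the precondition, e.g. on eliminate_duplicates_hour({'abc': 1}): A raises IndexError, B raises IndexError
import Mathlib
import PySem

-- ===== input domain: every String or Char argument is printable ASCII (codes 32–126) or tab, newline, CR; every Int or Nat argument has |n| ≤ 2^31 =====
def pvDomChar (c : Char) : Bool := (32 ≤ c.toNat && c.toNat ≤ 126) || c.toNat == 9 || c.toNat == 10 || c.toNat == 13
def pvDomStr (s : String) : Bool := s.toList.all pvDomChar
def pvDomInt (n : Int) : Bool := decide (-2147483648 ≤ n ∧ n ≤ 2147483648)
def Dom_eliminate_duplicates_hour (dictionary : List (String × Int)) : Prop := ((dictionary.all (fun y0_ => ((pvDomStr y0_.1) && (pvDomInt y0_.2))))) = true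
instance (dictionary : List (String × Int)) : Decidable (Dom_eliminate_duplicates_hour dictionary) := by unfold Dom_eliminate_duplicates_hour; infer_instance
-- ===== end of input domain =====

-- B replaces A's count-the-distinct-years two-pass strategy by a single early-exit
-- pass comparing every year to the first key's year (objective: alternative).


-- ===== PORT A =====
def eliminate_duplicates_hour (dictionary : List (String × Int)) : List (String × Int) :=
  let year_dictionary : PySem.Dict String Bool :=
    dictionary.foldl
      (fun d p => d.insert ((PySem.List.pyGet? (((PySem.Str.split? p.1 ",").getD [])) 1).getD "") true)
      (PySem.Dict.mk [])
  if year_dictionary.size == 1 then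
    (dictionary.foldl
      (fun r p => r.insert ((PySem.List.pyGet? (((PySem.Str.split? p.1 ",").getD [])) 0).getD "")
                           (PySem.Dict.getD (PySem.Dict.mk dictionary) p.1 0))
      (PySem.Dict.mk [])).items
  else
    dictionary

-- ===== PORT B =====
-- the 'for key, value in it:' loop of Source B: early exit to `orig` on a year mismatch
def edhGo (year : String) (result : PySem.Dict String Int) (orig : List (String × Int)) :
    List (String × Int) → List (String × Int)
  | [] => result.items
  | p :: tl =>
    let parts := (PySem.Str.split? p.1 ",").getD []
    if ((PySem.List.pyGet? parts 1).getD "") ≠ year then orig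
    else edhGo year (result.insert ((PySem.List.pyGet? parts 0).getD "") p.2) orig tl

def eliminate_duplicates_hour_alt (dictionary : List (String × Int)) : List (String × Int) :=
  match dictionary with
  | [] => dictionary
  | p :: tl =>
    let year := (PySem.List.pyGet? ((PySem.Str.split? p.1 ",").getD []) 1).getD ""
    let result := (PySem.Dict.mk []).insert
      ((PySem.List.pyGet? ((PySem.Str.split? p.1 ",").getD []) 0).getD "") p.2
    edhGo year result dictionary tl

-- ===== PRECONDITION & SPEC =====
-- Pre_ excludes (a) keys without a ',' — there `key.split(',')[1]` raises IndexError —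
-- and (b) association lists with duplicate keys, which do not represent a Python dict
-- (the argument is a dict, whose keys are necessarily distinct).
def Pre_eliminate_duplicates_hour (dictionary : List (String × Int)) : Prop :=
  dictionary.Pairwise (fun p q => p.1 ≠ q.1) ∧
  ∀ p ∈ dictionary, 2 ≤ (((PySem.Str.split? p.1 ",").getD [])).length
instance (dictionary : List (String × Int)) : Decidable (Pre_eliminate_duplicates_hour dictionary) := by
  unfold Pre_eliminate_duplicates_hour; infer_instance

def pvWitness_eliminate_duplicates_hour : (List (String × Int)) :=
  [("a,2020", 1), ("b,2020", 2)]

def Spec_eliminate_duplicates_hour (dictionary : List (String × Int)) (out : List (String × Int)) : Prop :=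
  out = eliminate_duplicates_hour_alt dictionary
instance (dictionary : List (String × Int)) (out : List (String × Int)) : Decidable (Spec_eliminate_duplicates_hour dictionary out) := by
  unfold Spec_eliminate_duplicates_hour; infer_instance

-- ===== CLAIM =====
def Claim_equal_eliminate_duplicates_hour : Prop := ∀ (dictionary : List (String × Int)), Dom_eliminate_duplicates_hour dictionary → Pre_eliminate_duplicates_hour dictionary → Spec_eliminate_duplicates_hour dictionary (eliminate_duplicates_hour dictionary)

-- ===== LEMMAS AND PROOFS =====

-- abbreviations for the year / name fields of a key (proof-side only)
def pvYr (p : String × Int) : String :=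
  (PySem.List.pyGet? ((PySem.Str.split? p.1 ",").getD []) 1).getD ""
def pvNm (p : String × Int) : String :=
  (PySem.List.pyGet? ((PySem.Str.split? p.1 ",").getD []) 0).getD ""

-- adding only already-present elements leaves a set unchanged
theorem pvFoldAddMem (xs : List String) (s : PySem.Set String)
    (h : ∀ y ∈ xs, y ∈ s) : xs.foldl PySem.Set.add s = s := by
  induction xs generalizing s with
  | nil => rfl
  | cons x tl ih =>
    have hx : PySem.Set.add s x = s := by
      simp [PySem.Set.add, PySem.Set.contains, h x (List.mem_cons_self)]
    simpa [List.foldl, hx] using ih s (fun y hy => h y (List.mem_cons_of_mem _ hy))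

-- set(y :: ys) has exactly one element iff every element of ys equals y
theorem pvSetLenOne (y : String) (ys : List String) :
    (PySem.Set.ofList (y :: ys)).length = 1 ↔ ∀ z ∈ ys, z = y := by
  constructor
  · intro h z hz
    have hzmem : z ∈ PySem.Set.ofList (y :: ys) :=
      (PySem.Set.mem_ofList _ _).mpr (List.mem_cons_of_mem _ hz)
    have hymem : y ∈ PySem.Set.ofList (y :: ys) :=
      (PySem.Set.mem_ofList _ _).mpr List.mem_cons_self
    match hl : PySem.Set.ofList (y :: ys), h with
    | [a], _ =>
      rw [hl] at hzmem hymem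
      simp only [List.mem_singleton] at hzmem hymem
      rw [hzmem, hymem]
  · intro h
    have : PySem.Set.ofList (y :: ys) = [y] := by
      rw [PySem.Set.ofList_eq_foldl]
      simp only [List.foldl]
      have hadd : PySem.Set.add ([] : PySem.Set String) y = [y] := rfl
      rw [hadd]
      exact pvFoldAddMem ys [y] (by intro z hz; simp [h z hz])
    rw [this]
    rfl

-- the early-exit loop, when no mismatch occurs, is the fold of inserts
theorem pvGoAllEq (year : String) (rest : List (String × Int))
    (h : ∀ q ∈ rest, pvYr q = year) :
    ∀ (d : PySem.Dict String Int) (orig : List (String × Int)),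
    edhGo year d orig rest =
      (rest.foldl (fun r q => r.insert (pvNm q) q.2) d).items := by
  induction rest with
  | nil => intro d orig; rfl
  | cons q tl ih =>
    intro d orig
    have hq : pvYr q = year := h q List.mem_cons_self
    simp only [edhGo, List.foldl]
    rw [if_neg (by simpa [pvYr] using hq)]
    exact ih (fun r hr => h r (List.mem_cons_of_mem _ hr)) _ orig

-- the early-exit loop returns the original dict as soon as some year mismatches
theorem pvGoMismatch (year : String) (rest : List (String × Int))
    (h : ∃ q ∈ rest, pvYr q ≠ year) :
    ∀ (d : PySem.Dict String Int) (orig : List (String × Int)),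
    edhGo year d orig rest = orig := by
  induction rest with
  | nil => simp at h
  | cons q tl ih =>
    intro d orig
    simp only [edhGo]
    by_cases hq : pvYr q = year
    · rw [if_neg (by simpa [pvYr] using hq)]
      rcases h with ⟨r, hr, hne⟩
      rcases List.mem_cons.mp hr with h1 | h1
      · exact absurd (h1 ▸ hq) hne
      · exact ih ⟨r, h1, hne⟩ _ orig
    · rw [if_pos (by simpa [pvYr] using hq)]

-- A's year-dictionary size counts the distinct years
theorem pvSizeEq (dictionary : List (String × Int)) :
    (dictionary.foldl
      (fun d p => PySem.Dict.insert d ((PySem.List.pyGet? (((PySem.Str.split? p.1 ",").getD [])) 1).getD "") true)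
      (PySem.Dict.mk [])).size =
    (PySem.Set.ofList (dictionary.map pvYr)).length := by
  have h := PySem.Dict.keys_foldl_insert_key (ν := Bool) dictionary
            (fun p => pvYr p) (fun _ _ => true) (PySem.Dict.mk [])
  simp only [pvYr] at h
  have hlen : ∀ (d : PySem.Dict String Bool), d.size = d.keys.length := by
    intro d; simp [PySem.Dict.size, PySem.Dict.keys]
  rw [hlen, h]
  simp only [PySem.Set.update, PySem.Set.ofList_eq_foldl, PySem.Dict.keys]
  rfl

-- in an association list with pairwise-distinct keys, the first-match lookup of a
-- member pair's key returns that pair's value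
theorem pvGetNodup (l : List (String × Int)) (k : String) (v : Int)
    (hnd : l.Pairwise (fun p q => p.1 ≠ q.1)) (hm : (k, v) ∈ l) :
    (PySem.Dict.mk l).get? k = some v := by
  induction l with
  | nil => cases hm
  | cons p rest ih =>
    rcases List.pairwise_cons.mp hnd with ⟨hp, hrest⟩
    simp only [PySem.Dict.get?, List.find?]
    by_cases h : p.1 = k
    · rcases List.mem_cons.mp hm with h1 | h1
      · simp [← h1]
      · exact absurd ((h ▸ hp) (k, v) h1 rfl) (by simp)
    · have : (p.1 == k) = false := by simp [h]
      simp only [this]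
      have hm' : (k, v) ∈ rest := by
        rcases List.mem_cons.mp hm with h1 | h1
        · exact absurd (congrArg Prod.fst h1).symm h
        · exact h1
      simpa [PySem.Dict.get?] using ih hrest hm'

-- ===== VERDICT =====
theorem eliminate_duplicates_hour_spec : Claim_equal_eliminate_duplicates_hour := by
  intro dictionary _ hpre
  unfold Spec_eliminate_duplicates_hour eliminate_duplicates_hour eliminate_duplicates_hour_alt
  rcases hpre with ⟨hnd, _⟩
  -- A's inner lookup dictionary[key] is just the pair's own value (distinct keys)
  have hres :
      dictionary.foldl
        (fun r p => PySem.Dict.insert r ((PySem.List.pyGet? (((PySem.Str.split? p.1 ",").getD [])) 0).getD "")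
                     (PySem.Dict.getD (PySem.Dict.mk dictionary) p.1 0))
        (PySem.Dict.mk []) =
      dictionary.foldl
        (fun r p => PySem.Dict.insert r (pvNm p) p.2)
        (PySem.Dict.mk []) := by
    apply PySem.List.foldl_congr_mem
    intro acc p hp
    have hv : PySem.Dict.getD (PySem.Dict.mk dictionary) p.1 0 = p.2 := by
      have := pvGetNodup dictionary p.1 p.2 hnd (by simpa using hp)
      simp [PySem.Dict.getD, this]
    rw [hv]; rfl
  dsimp only
  rw [hres, pvSizeEq]
  match dictionary, hnd with
  | [], _ => rfl
  | p :: tl, hnd =>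
    simp only [List.map_cons]
    by_cases hall : ∀ q ∈ tl, pvYr q = pvYr p
    · have hsz : (PySem.Set.ofList (pvYr p :: tl.map pvYr)).length = 1 := by
        rw [pvSetLenOne]
        intro z hz
        rcases List.mem_map.mp hz with ⟨q, hq, rfl⟩
        exact hall q hq
      rw [if_pos (by simp [hsz])]
      show (List.foldl (fun r q => r.insert (pvNm q) q.2) (PySem.Dict.mk []) (p :: tl)).items =
        edhGo (pvYr p) ((PySem.Dict.mk []).insert (pvNm p) p.2) (p :: tl) tl
      rw [pvGoAllEq (pvYr p) tl hall]
      rfl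
    · push Not at hall
      rcases hall with ⟨q, hq, hne⟩
      have hsz : (PySem.Set.ofList (pvYr p :: tl.map pvYr)).length ≠ 1 := by
        rw [Ne, pvSetLenOne]
        push Not
        exact ⟨pvYr q, List.mem_map_of_mem hq, hne⟩
      rw [if_neg (by simpa using hsz)]
      show p :: tl = edhGo (pvYr p) ((PySem.Dict.mk []).insert (pvNm p) p.2) (p :: tl) tl
      rw [pvGoMismatch (pvYr p) tl ⟨q, hq, hne⟩]
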